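-- pv_equiv track=rewrite | github.com/Delayless/Think_Python | Chapter-9/Ex9_7.py | triple_tap
-- ===== SOURCE A (Python) =====
-- def triple_tap(string):
--     i = 0
--     if len(string) < 6:
--         return False
--     # 最大的i为长度len(str)-6,从0开始的
--     while i < len(string) - 5:
--         if string[i:i + 6:2] == string[i + 1:i + 7:2]:
--             return True
--         i = i + 1
--
--     return False
-- ===== SOURCE B (Python) =====
-- def triple_tap(string):
--     # One pass over the characters, O(1) state: r1/r2 are the lengths of the
--     # runs of consecutive doubled pairs (stride 2) ending at the last two
--     # adjacent pairs; a run of 3 means three consecutive doubled characters.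
--     r1 = r2 = 0
--     prev = None
--     for ch in string:
--         if prev is not None:
--             r = r2 + 1 if prev == ch else 0
--             if r == 3:
--                 return True
--             r1, r2 = r, r1
--         prev = ch
--     return False
-- ===== Notes on version B (the rewrite author's own statement) =====
-- stated objective: alternative
-- what changed: A slides a window and builds two stride-2 slices at every position to compare; B makes a single pass over the characters keeping only two run-length counters of consecutive doubled adjacent pairs and reports success when a run reaches 3.
import Mathlib
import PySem

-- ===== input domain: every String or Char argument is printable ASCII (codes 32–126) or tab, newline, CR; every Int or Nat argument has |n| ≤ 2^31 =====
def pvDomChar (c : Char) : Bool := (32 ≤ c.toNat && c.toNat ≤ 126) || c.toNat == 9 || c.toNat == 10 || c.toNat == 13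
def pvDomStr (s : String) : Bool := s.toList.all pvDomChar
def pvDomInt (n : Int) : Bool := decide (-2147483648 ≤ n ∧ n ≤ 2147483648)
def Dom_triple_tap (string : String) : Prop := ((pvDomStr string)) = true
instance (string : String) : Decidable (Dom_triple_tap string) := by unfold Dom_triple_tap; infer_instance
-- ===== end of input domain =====

-- B replaces A's sliding comparison of two stride-2 slices by a single pass over the
-- characters with O(1) state (run lengths of doubled adjacent pairs); objective:
-- alternative (same O(n) cost, no per-position slice construction).

-- ===== PORT A =====
-- while i < len(string) - 5: if string[i:i+6:2] == string[i+1:i+7:2]: return True; i += 1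
def tripleTapLoop (s : String) (i : Nat) : Bool :=
  if h : (i : Int) < PySem.Str.len s - 5 then
    if PySem.Str.slice? s (some (i : Int)) (some ((i : Int) + 6)) 2
        == PySem.Str.slice? s (some ((i : Int) + 1)) (some ((i : Int) + 7)) 2 then
      true
    else
      tripleTapLoop s (i + 1)
  else
    false
termination_by s.toList.length - i
decreasing_by
  simp only [PySem.Str.len_eq] at h
  omega

def triple_tap (string : String) : Bool :=
  if PySem.Str.len string < 6 then false
  else tripleTapLoop string 0

-- ===== PORT B =====
-- for ch in string: r = r2+1 if prev == ch else 0; return True at r == 3; r1, r2 = r, r1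
def altLoop : List Char → Char → Nat → Nat → Bool
  | [], _, _, _ => false
  | ch :: rest, prev, r1, r2 =>
    let r := if prev == ch then r2 + 1 else 0
    if r == 3 then true else altLoop rest ch r r1

def triple_tap_alt (string : String) : Bool :=
  match string.toList with
  | [] => false
  | c :: rest => altLoop rest c 0 0

-- ===== PRECONDITION & SPEC =====
def Spec_triple_tap (string : String) (out : Bool) : Prop := out = triple_tap_alt string
instance (string : String) (out : Bool) : Decidable (Spec_triple_tap string out) := by unfold Spec_triple_tap; infer_instance

-- ===== CLAIM (what is proved, stated in full; the proofs are below) =====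
def Claim_equal_triple_tap : Prop := ∀ (string : String), Dom_triple_tap string → Spec_triple_tap string (triple_tap string)

-- ===== LEMMAS AND PROOFS =====

-- pair j of s is doubled (s[j] == s[j+1], both in range)
def dbl (s : List Char) (j : Nat) : Bool :=
  decide (j + 2 ≤ s.length) && (s.getD j 'a' == s.getD (j + 1) 'a')

-- length of the run of doubled pairs (stride 2) ending at pair t-2; runAt 0 = runAt 1 = 0
def runAt (s : List Char) : Nat → Nat
  | 0 => 0
  | 1 => 0
  | t + 2 => if dbl s t then runAt s t + 1 else 0

lemma runAt_pos (s : List Char) (m : Nat) (h : 1 ≤ runAt s m) :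
    ∃ t, m = t + 2 ∧ dbl s t = true ∧ runAt s m = runAt s t + 1 := by
  match m with
  | 0 => simp [runAt] at h
  | 1 => simp [runAt] at h
  | t + 2 =>
    refine ⟨t, rfl, ?_, ?_⟩ <;> by_cases hd : dbl s t = true <;> simp [runAt, hd] at h ⊢

lemma dbl_le (s : List Char) (j : Nat) (h : dbl s j = true) : j + 2 ≤ s.length := by
  have := ((Bool.and_eq_true _ _).mp h).1
  exact of_decide_eq_true this

lemma runAt_ge_three (s : List Char) (m : Nat) (h : 3 ≤ runAt s m) :
    ∃ j, j + 6 ≤ s.length ∧ dbl s j = true ∧ dbl s (j + 2) = true ∧ dbl s (j + 4) = true := by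
  obtain ⟨t1, rfl, hd1, he1⟩ := runAt_pos s m (by omega)
  obtain ⟨t2, rfl, hd2, he2⟩ := runAt_pos s t1 (by omega)
  obtain ⟨t3, rfl, hd3, _⟩ := runAt_pos s t2 (by omega)
  exact ⟨t3, by have := dbl_le s (t3 + 4) hd1; omega, hd3, hd2, hd1⟩

lemma good_runAt (s : List Char) (j : Nat)
    (h1 : dbl s j = true) (h2 : dbl s (j + 2) = true) (h3 : dbl s (j + 4) = true) :
    3 ≤ runAt s (j + 6) := by
  have e3 : runAt s (j + 6) = runAt s (j + 4) + 1 := by simp [runAt, h3]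
  have e2 : runAt s (j + 4) = runAt s (j + 2) + 1 := by simp [runAt, h2]
  have e1 : runAt s (j + 2) = runAt s j + 1 := by simp [runAt, h1]
  omega

-- the three-element value of a stride-2 slice s[a:a+6:2] when a+5 ≤ len (stop may clamp by one)
lemma slice2 (s : List Char) (a : Nat) (h : a + 5 ≤ s.length) :
    PySem.List.slice? s (some (a : Int)) (some ((a : Int) + 6)) 2
      = some [s.getD a 'a', s.getD (a + 2) 'a', s.getD (a + 4) 'a'] := by
  simp only [PySem.List.slice?, PySem.List.sliceIndices]
  rw [if_neg (by norm_num : ¬ (2:Int) = 0)]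
  simp only [show ¬((2:Int) < 0) from by norm_num, if_false,
             show ((0:Int) < 2) from by norm_num, if_true,
             if_neg (show ¬((a:Int) < 0) from by omega),
             if_neg (show ¬((a:Int) + 6 < 0) from by omega),
             show min (a:Int) (s.length:Int) = (a:Int) from by omega]
  have he : min ((a:Int) + 6) (s.length:Int) = (a:Int) + 6 ∨
      min ((a:Int) + 6) (s.length:Int) = (a:Int) + 5 := by omega
  have hcnt : (if (a:Int) < min ((a:Int) + 6) (s.length:Int) then
      (((min ((a:Int) + 6) (s.length:Int)) - (a:Int) + 2 - 1) / 2).toNat else 0) = 3 := by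
    rcases he with he | he <;> rw [he] <;> norm_num <;> decide
  rw [hcnt, show List.range 3 = [0,1,2] from by decide]
  simp only [List.filterMap_cons, List.filterMap_nil]
  rw [show ((a:Int) + 2 * ((0:Nat):Int)).toNat = a from by push_cast; omega,
      show ((a:Int) + 2 * ((1:Nat):Int)).toNat = a + 2 from by push_cast; omega,
      show ((a:Int) + 2 * ((2:Nat):Int)).toNat = a + 4 from by push_cast; omega]
  rw [List.getElem?_eq_getElem (by omega : a < s.length),
      List.getElem?_eq_getElem (by omega : a + 2 < s.length),
      List.getElem?_eq_getElem (by omega : a + 4 < s.length)]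
  simp [List.getD_eq_getElem?_getD,
        show a < s.length by omega, show a + 2 < s.length by omega, show a + 4 < s.length by omega]

lemma dbl_intro (s : List Char) (j : Nat) (hj : j + 2 ≤ s.length)
    (he : s.getD j 'a' = s.getD (j + 1) 'a') : dbl s j = true := by
  simp only [dbl, Bool.and_eq_true, decide_eq_true_eq, beq_iff_eq]
  exact ⟨hj, he⟩

lemma dbl_elim (s : List Char) (j : Nat) (h : dbl s j = true) :
    s.getD j 'a' = s.getD (j + 1) 'a' :=
  beq_iff_eq.mp ((Bool.and_eq_true _ _).mp h).2

lemma tripleTapLoop_spec (s : String) (i : Nat) :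
    tripleTapLoop s i = true ↔
      ∃ j, i ≤ j ∧ dbl s.toList j = true ∧ dbl s.toList (j + 2) = true ∧
        dbl s.toList (j + 4) = true := by
  rw [tripleTapLoop]
  by_cases h : (i : Int) < PySem.Str.len s - 5
  · rw [dif_pos h]
    have hn : i + 6 ≤ s.toList.length := by
      simp only [PySem.Str.len_eq] at h; omega
    have hb : ∀ (A B A' B' : Int),
        (PySem.Str.slice? s (some A) (some B) 2 == PySem.Str.slice? s (some A') (some B') 2) =
          decide (PySem.List.slice? s.toList (some A) (some B) 2 =
            PySem.List.slice? s.toList (some A') (some B') 2) := by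
      intro A B A' B'
      have key : (PySem.Str.slice? s (some A) (some B) 2 = PySem.Str.slice? s (some A') (some B') 2)
          ↔ (PySem.List.slice? s.toList (some A) (some B) 2 =
              PySem.List.slice? s.toList (some A') (some B') 2) := by
        constructor
        · intro he
          rw [← PySem.Chars.slice?_eq_listSlice?, ← PySem.Chars.slice?_eq_listSlice?,
              ← PySem.Str.slice?_map, ← PySem.Str.slice?_map, he]
        · intro hl
          have hinj : Function.Injective (Option.map String.toList) :=
            Option.map_injective (fun a b hab => String.toList_inj.mp hab)
          apply hinj
          rw [PySem.Str.slice?_map, PySem.Str.slice?_map,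
              PySem.Chars.slice?_eq_listSlice?, PySem.Chars.slice?_eq_listSlice?, hl]
      rw [Bool.eq_iff_iff]
      simp only [beq_iff_eq, decide_eq_true_eq]
      exact key
    rw [hb]
    have hA := slice2 s.toList i (by omega)
    have hB : PySem.List.slice? s.toList (some ((i:Int) + 1)) (some ((i:Int) + 7)) 2
        = some [s.toList.getD (i+1) 'a', s.toList.getD (i+3) 'a', s.toList.getD (i+5) 'a'] := by
      rw [show ((i:Int) + 1) = (((i+1 : Nat)):Int) from by push_cast; ring,
          show ((i:Int) + 7) = (((i+1 : Nat)):Int) + 6 from by push_cast; ring,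
          slice2 s.toList (i+1) (by omega),
          show i + 1 + 2 = i + 3 from by omega, show i + 1 + 4 = i + 5 from by omega]
    rw [hA, hB]
    by_cases hg : s.toList.getD i 'a' = s.toList.getD (i + 1) 'a' ∧
        s.toList.getD (i + 2) 'a' = s.toList.getD (i + 3) 'a' ∧
        s.toList.getD (i + 4) 'a' = s.toList.getD (i + 5) 'a'
    · rw [if_pos (decide_eq_true (by rw [hg.1, hg.2.1, hg.2.2]))]
      constructor
      · intro _
        refine ⟨i, le_refl i, dbl_intro _ _ (by omega) hg.1, ?_, ?_⟩
        · exact dbl_intro _ (i + 2) (by omega)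
            ((show i + 2 + 1 = i + 3 from by omega) ▸ hg.2.1)
        · exact dbl_intro _ (i + 4) (by omega)
            ((show i + 4 + 1 = i + 5 from by omega) ▸ hg.2.2)
      · intro _; rfl
    · rw [if_neg (show ¬ (decide (some [s.toList.getD i 'a', s.toList.getD (i+2) 'a',
            s.toList.getD (i+4) 'a'] = some [s.toList.getD (i+1) 'a', s.toList.getD (i+3) 'a',
            s.toList.getD (i+5) 'a']) = true) from by
          intro hd
          have hl := of_decide_eq_true hd
          simp only [Option.some.injEq, List.cons.injEq, and_true] at hl
          exact hg ⟨hl.1, hl.2.1, hl.2.2⟩)]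
      rw [tripleTapLoop_spec s (i + 1)]
      constructor
      · rintro ⟨j, hij, h1, h2, h3⟩
        exact ⟨j, by omega, h1, h2, h3⟩
      · rintro ⟨j, hij, h1, h2, h3⟩
        rcases Nat.eq_or_lt_of_le hij with rfl | hlt
        · exfalso
          apply hg
          refine ⟨dbl_elim _ _ h1, ?_, ?_⟩
          · exact (show i + 2 + 1 = i + 3 from by omega) ▸ dbl_elim _ _ h2
          · exact (show i + 4 + 1 = i + 5 from by omega) ▸ dbl_elim _ _ h3
        · exact ⟨j, by omega, h1, h2, h3⟩
  · rw [dif_neg h]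
    simp only [PySem.Str.len_eq] at h
    constructor
    · intro hf; cases hf
    · rintro ⟨j, hij, _, _, h3⟩
      have := dbl_le _ _ h3
      omega
termination_by s.toList.length - i
decreasing_by
  simp only [PySem.Str.len_eq] at h
  omega

lemma altLoop_spec (s : List Char) : ∀ (rest : List Char) (k r1 r2 : Nat),
    k < s.length → s.drop (k + 1) = rest →
    r1 = runAt s (k + 1) → r2 = runAt s k → r1 ≤ 2 → r2 ≤ 2 →
    (altLoop rest (s.getD k 'a') r1 r2 = true ↔ ∃ m, k ≤ m ∧ 3 ≤ runAt s (m + 2)) := by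
  intro rest
  induction rest generalizing s with
  | nil =>
    intro k r1 r2 hk hdrop _ _ _ _
    have hlen : s.length ≤ k + 1 := by
      have := congrArg List.length hdrop
      simp [List.length_drop] at this
      omega
    simp only [altLoop]
    constructor
    · intro hf; cases hf
    · rintro ⟨m, hkm, hm⟩
      obtain ⟨t, ht, hd, _⟩ := runAt_pos s (m + 2) (by omega)
      have := dbl_le s t hd
      omega
  | cons ch rest' ih =>
    intro k r1 r2 hk hdrop hr1 hr2 hb1 hb2
    have hk1 : k + 1 < s.length := by
      have := congrArg List.length hdrop
      simp [List.length_drop] at this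
      omega
    have hch : ch = s.getD (k + 1) 'a' := by
      have : s.drop (k + 1) = ch :: rest' := hdrop
      have hg : (s.drop (k + 1)).getD 0 'a' = ch := by rw [this]; rfl
      rw [List.getD_eq_getElem?_getD] at hg ⊢
      rw [List.getElem?_drop] at hg
      simpa using hg.symm
    have hdrop' : s.drop (k + 2) = rest' := by
      have h1 : (s.drop (k + 1)).drop 1 = rest' := by rw [hdrop]; rfl
      rw [List.drop_drop] at h1
      simpa using h1
    have hpair : (s.getD k 'a' == ch) = dbl s k := by
      rw [hch]
      simp [dbl, show k + 2 ≤ s.length by omega]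
    simp only [altLoop]
    rw [hpair]
    have hrr : (if dbl s k then r2 + 1 else 0) = runAt s (k + 2) := by
      by_cases hd : dbl s k = true <;> simp [runAt, hd, hr2]
    rw [hrr]
    by_cases h3 : runAt s (k + 2) = 3
    · rw [if_pos (by simp [h3])]
      exact ⟨fun _ => ⟨k, le_refl k, by omega⟩, fun _ => rfl⟩
    · rw [if_neg (by simp [h3])]
      have hle : runAt s (k + 2) ≤ 2 := by
        by_cases hd : dbl s k = true
        · have : runAt s (k + 2) = r2 + 1 := by rw [← hrr, if_pos hd]
          omega
        · have : runAt s (k + 2) = 0 := by rw [← hrr, if_neg hd]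
          omega
      rw [hch]
      rw [ih s (k + 1) (runAt s (k + 2)) r1 hk1 hdrop' rfl hr1 hle hb1]
      constructor
      · rintro ⟨m, hm, h3m⟩; exact ⟨m, by omega, h3m⟩
      · rintro ⟨m, hm, h3m⟩
        rcases Nat.eq_or_lt_of_le hm with rfl | hlt
        · omega
        · exact ⟨m, by omega, h3m⟩

lemma alt_list (l : List Char) :
    (match l with | [] => false | c :: rest => altLoop rest c 0 0) = true ↔
      ∃ m, 3 ≤ runAt l (m + 2) := by
  cases l with
  | nil =>
    constructor
    · intro hf; cases hf
    · rintro ⟨m, hm⟩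
      obtain ⟨t, _, hd, _⟩ := runAt_pos [] (m + 2) (by omega)
      have := dbl_le [] t hd
      simp at this
  | cons c rest =>
    have H := altLoop_spec (c :: rest) rest 0 0 0 (by simp) rfl rfl rfl
      (by omega) (by omega)
    constructor
    · intro hl
      obtain ⟨m, _, hm⟩ := H.mp hl
      exact ⟨m, hm⟩
    · rintro ⟨m, hm⟩
      exact H.mpr ⟨m, Nat.zero_le m, hm⟩

lemma alt_spec (s : String) :
    triple_tap_alt s = true ↔ ∃ m, 3 ≤ runAt s.toList (m + 2) := by
  rw [triple_tap_alt]
  exact alt_list s.toList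

-- runAt and dbl are stated on s.toList; note runAt of alt_spec matches tripleTapLoop_spec's dbl's
lemma exists_iff (s : String) :
    (∃ j, 0 ≤ j ∧ dbl s.toList j = true ∧ dbl s.toList (j + 2) = true ∧
        dbl s.toList (j + 4) = true) ↔ ∃ m, 3 ≤ runAt s.toList (m + 2) := by
  constructor
  · rintro ⟨j, _, h1, h2, h3⟩
    exact ⟨j + 4, by have := good_runAt s.toList j h1 h2 h3; omega⟩
  · rintro ⟨m, hm⟩
    obtain ⟨j, _, h1, h2, h3⟩ := runAt_ge_three s.toList (m + 2) hm
    exact ⟨j, Nat.zero_le j, h1, h2, h3⟩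

-- ===== VERDICT (by name: the statement is the Claim_ definition above) =====
theorem triple_tap_spec : Claim_equal_triple_tap := by
  intro s _
  unfold Spec_triple_tap triple_tap
  by_cases h6 : PySem.Str.len s < 6
  · rw [if_pos h6]
    symm
    rw [← Bool.not_eq_true, alt_spec]
    rintro ⟨m, hm⟩
    obtain ⟨j, hj, _, _, _⟩ := runAt_ge_three s.toList (m + 2) hm
    rw [PySem.Str.len_eq] at h6
    omega
  · rw [if_neg h6]
    rw [Bool.eq_iff_iff, tripleTapLoop_spec s 0, alt_spec]
    constructor
    · rintro ⟨j, _, h1, h2, h3⟩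
      exact (exists_iff s).mp ⟨j, Nat.zero_le j, h1, h2, h3⟩
    · intro hm
      obtain ⟨j, _, h1, h2, h3⟩ := (exists_iff s).mpr hm
      exact ⟨j, Nat.zero_le j, h1, h2, h3⟩
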